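-- pv_equiv track=rewrite | github.com/ardaunal4/DESY-Timepix4 | Timepix4-Visualization-Scripts/pixelHistograms.py | countPackets
-- ===== SOURCE A (Python) =====
-- def countPackets(DATA):
--     """
--     This function counts packets pixel by pixel and add them into a list.
--     """
--     packetList = []
--
--     for y in range(512):
--         for x in range(448):
--             count = DATA.count((x, y)) # .count function is one of the built in function in Python which counts given element in the list.
--             if count != 0:
--                 packetList.append(count)
--
--     return packetList
-- ===== SOURCE B (Python) =====
-- def countPackets(DATA):
--     """
--     Tally DATA in one pass, keep the in-window coordinates, and emit their
--     counts in (y, x) scan order.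
--     """
--     tally = {}
--     for p in DATA:
--         tally[p] = tally.get(p, 0) + 1
--     keys = [(x, y) for (x, y) in tally if 0 <= x < 448 and 0 <= y < 512]
--     keys.sort(key=lambda p: (p[1], p[0]))
--     return [tally[k] for k in keys]
-- ===== Notes on version B (the rewrite author's own statement) =====
-- stated objective: faster
-- what changed: Replaces the full 512x448 grid scan with DATA.count at every cell by a single dict tally over DATA, then filters the distinct in-window coordinates, sorts them by (y, x) and emits their counts.
import Mathlib
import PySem

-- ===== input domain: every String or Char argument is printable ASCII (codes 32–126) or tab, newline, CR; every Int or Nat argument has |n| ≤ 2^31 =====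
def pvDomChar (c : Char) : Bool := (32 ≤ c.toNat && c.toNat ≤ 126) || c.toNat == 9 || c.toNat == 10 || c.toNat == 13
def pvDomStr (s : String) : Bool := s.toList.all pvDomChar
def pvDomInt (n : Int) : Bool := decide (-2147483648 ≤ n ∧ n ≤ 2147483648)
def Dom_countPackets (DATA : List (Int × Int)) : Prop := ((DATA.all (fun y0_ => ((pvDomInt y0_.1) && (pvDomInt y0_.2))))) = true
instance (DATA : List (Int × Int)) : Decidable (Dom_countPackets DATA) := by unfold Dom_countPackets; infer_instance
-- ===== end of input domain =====

-- B replaces A's full 512×448 grid scan with DATA.count at every cell by one tally pass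
-- over DATA plus a sort of the distinct in-window coordinates by (y, x); objective: faster.

-- ===== PORT A =====
def countPackets (DATA : List (Int × Int)) : List Int :=
  (PySem.List.pyRange 0 512).foldl (fun packetList y =>
    (PySem.List.pyRange 0 448).foldl (fun packetList x =>
      let count : Int := PySem.List.count DATA (x, y)
      if count ≠ 0 then packetList ++ [count] else packetList) packetList) []

-- ===== PORT B =====
def countPackets_alt (DATA : List (Int × Int)) : List Int :=
  let tally : PySem.Dict (Int × Int) Int :=
    DATA.foldl (fun d p => d.insert p (d.getD p 0 + 1)) PySem.Dict.empty
  let keys : List (Int × Int) :=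
    tally.keys.filter (fun p => decide (0 ≤ p.1 ∧ p.1 < 448 ∧ 0 ≤ p.2 ∧ p.2 < 512))
  -- Python tuple comparison key=(p[1], p[0]) is lexicographic: ported as toLex
  let skeys := PySem.List.sorted keys (fun p => toLex (p.2, p.1))
  skeys.map (fun k => tally.getD k 0)

-- ===== PRECONDITION & SPEC =====
def Spec_countPackets (DATA : List (Int × Int)) (out : List Int) : Prop := out = countPackets_alt DATA
instance (DATA : List (Int × Int)) (out : List Int) : Decidable (Spec_countPackets DATA out) := by unfold Spec_countPackets; infer_instance

-- ===== CLAIM (what is proved, stated in full; the proofs are below) =====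
def Claim_equal_countPackets : Prop := ∀ (DATA : List (Int × Int)), Dom_countPackets DATA → Spec_countPackets DATA (countPackets DATA)

-- ===== LEMMAS AND PROOFS =====

-- The full coordinate grid, in A's scan order (y outer, x inner).
def pvGrid : List (Int × Int) :=
  (PySem.List.pyRange 0 512).flatMap (fun y => (PySem.List.pyRange 0 448).map (fun x => (x, y)))

def pvKey (p : Int × Int) : Lex (Int × Int) := toLex (p.2, p.1)

def pvWin (p : Int × Int) : Bool := decide (0 ≤ p.1 ∧ p.1 < 448 ∧ 0 ≤ p.2 ∧ p.2 < 512)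

lemma pv_mem_grid (p : Int × Int) : p ∈ pvGrid ↔ pvWin p = true := by
  simp only [pvGrid, pvWin, List.mem_flatMap, List.mem_map, PySem.List.mem_pyRange_one,
    decide_eq_true_eq]
  constructor
  · rintro ⟨y, hy, x, hx, rfl⟩; exact ⟨hx.1, hx.2, hy.1, hy.2⟩
  · rintro ⟨h1, h2, h3, h4⟩; exact ⟨p.2, ⟨h3, h4⟩, p.1, ⟨h1, h2⟩, rfl⟩

lemma pv_grid_pairwise : pvGrid.Pairwise (fun a b => pvKey a < pvKey b) := by
  rw [pvGrid, List.pairwise_flatMap]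
  refine ⟨?_, ?_⟩
  · intro y _
    refine List.Pairwise.map _ ?_ (PySem.List.pairwise_lt_pyRange_one 0 448)
    intro a b hab
    simp [pvKey, Prod.Lex.toLex_lt_toLex, hab]
  · refine List.Pairwise.imp ?_ (PySem.List.pairwise_lt_pyRange_one 0 512)
    intro y1 y2 h12 p hp q hq
    simp only [List.mem_map] at hp hq
    obtain ⟨x1, _, rfl⟩ := hp
    obtain ⟨x2, _, rfl⟩ := hq
    simp [pvKey, Prod.Lex.toLex_lt_toLex, h12]

lemma pv_key_lt_ne {a b : Int × Int} (h : pvKey a < pvKey b) : a ≠ b := by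
  intro hab; rw [hab] at h; exact lt_irrefl _ h

-- A's value: counts of the in-DATA grid cells in scan order.
lemma pv_A_eq (DATA : List (Int × Int)) :
    countPackets DATA
      = (pvGrid.filter (fun p => decide (p ∈ DATA))).map
          (fun p => (PySem.List.count DATA p : Int)) := by
  unfold countPackets
  have hinner : ∀ (y : Int) (acc : List Int),
      (PySem.List.pyRange 0 448).foldl (fun packetList x =>
        let count : Int := PySem.List.count DATA (x, y)
        if count ≠ 0 then packetList ++ [count] else packetList) acc
      = acc ++ ((PySem.List.pyRange 0 448).filter (fun x => decide ((x, y) ∈ DATA))).map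
          (fun x => (PySem.List.count DATA (x, y) : Int)) := by
    intro y acc
    rw [← PySem.List.foldl_append_if (fun x => decide ((x, y) ∈ DATA))
          (fun x => (PySem.List.count DATA (x, y) : Int))]
    congr 1
    funext acc x
    by_cases h : (x, y) ∈ DATA
    · have hc : List.count (x, y) DATA ≠ 0 := by
        have := List.count_pos_iff.mpr h; omega
      simp [h, PySem.List.count, hc]
    · simp [h, PySem.List.count, List.count_eq_zero.mpr h]
  calc (PySem.List.pyRange 0 512).foldl (fun packetList y =>
        (PySem.List.pyRange 0 448).foldl (fun packetList x =>
          let count : Int := PySem.List.count DATA (x, y)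
          if count ≠ 0 then packetList ++ [count] else packetList) packetList) []
      = (PySem.List.pyRange 0 512).foldl (fun acc y =>
          acc ++ ((PySem.List.pyRange 0 448).filter (fun x => decide ((x, y) ∈ DATA))).map
            (fun x => (PySem.List.count DATA (x, y) : Int))) [] := by
        congr 1; funext acc y; exact hinner y acc
    _ = (PySem.List.pyRange 0 512).flatMap (fun y =>
          ((PySem.List.pyRange 0 448).filter (fun x => decide ((x, y) ∈ DATA))).map
            (fun x => (PySem.List.count DATA (x, y) : Int))) := by
        rw [PySem.List.foldl_append_eq_flatMap]; simp
    _ = _ := by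
        rw [pvGrid, List.filter_flatMap, List.map_flatMap]
        congr 1
        funext y
        rw [List.filter_map, List.map_map]
        rfl

-- B's tally loop is exactly PySem's counter.
lemma pv_tally_eq (DATA : List (Int × Int)) :
    DATA.foldl (fun d p => d.insert p (d.getD p 0 + 1)) PySem.Dict.empty
      = PySem.Dict.counter DATA := by
  rw [PySem.Dict.counter]; rfl

-- The sorted distinct in-window keys are exactly the in-DATA grid cells in scan order.
lemma pv_sorted_eq (DATA : List (Int × Int)) :
    PySem.List.sorted ((PySem.Set.ofList DATA).filter pvWin) pvKey
      = pvGrid.filter (fun p => decide (p ∈ DATA)) := by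
  apply PySem.List.sorted_eq_of_perm_of_pairwise_lt
  · rw [List.perm_ext_iff_of_nodup]
    · intro p
      simp only [List.mem_filter, pv_mem_grid, decide_eq_true_eq, PySem.Set.mem_ofList]
      tauto
    · exact (pv_grid_pairwise.imp pv_key_lt_ne).filter _
    · exact (PySem.Set.nodup_ofList DATA).filter _
  · exact pv_grid_pairwise.filter _

-- B's value equals the same canonical form.
lemma pv_B_eq (DATA : List (Int × Int)) :
    countPackets_alt DATA
      = (pvGrid.filter (fun p => decide (p ∈ DATA))).map
          (fun p => (PySem.List.count DATA p : Int)) := by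
  simp only [countPackets_alt]
  rw [pv_tally_eq, PySem.Dict.keys_counter,
      show (fun p : Int × Int => decide (0 ≤ p.1 ∧ p.1 < 448 ∧ 0 ≤ p.2 ∧ p.2 < 512)) = pvWin from rfl,
      show (fun p : Int × Int => toLex (p.2, p.1)) = pvKey from rfl,
      pv_sorted_eq]
  apply List.map_congr_left
  intro p _
  exact PySem.Dict.getD_counter DATA p

-- ===== VERDICT (by name: the statement is the Claim_ definition above) =====
theorem countPackets_spec : Claim_equal_countPackets := by
  intro DATA _
  show countPackets DATA = countPackets_alt DATA
  rw [pv_A_eq, pv_B_eq]
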